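-- pv_equiv track=rewrite | github.com/Ritesh1137/langchain-doc-intelligence-loader | langchain_doc_intelligence/AzureAIDocumentIntelligenceParser.py | extract_tables_with_captions
-- ===== SOURCE A (Python) =====
-- def extract_tables_with_captions(md_content):
--     lines = md_content.split('\n')
--     tables = []
--     current_table = []
--     in_table = False
--     header_stack = []
--     current_metadata = {}
--
--     for i, line in enumerate(lines):
--         stripped_line = line.strip()
--
--         # Header tracking
--         if stripped_line.startswith('#'):
--             header_level = stripped_line.count('#')
--             header = stripped_line[header_level:].strip()
--             header_stack = header_stack[:header_level]  # Reset stack at current level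
--             current_metadata = {f'level_{level}': name for level, name in header_stack}
--             current_metadata['current_header'] = header  # Update current metadata
--             header_stack.append((header_level, header))  # Push current header to stack
--
--         # Table extraction
--         if '|' in line:
--             if not in_table:
--                 in_table = True
--                 current_table = [line]
--             else:
--                 current_table.append(line)
--         else:
--             if in_table:
--                 in_table = False
--                 potential_caption = lines[i + 1] if i + 1 < len(lines) else ""
--                 if potential_caption and not potential_caption.startswith('|'):
--                     caption = potential_caption.strip()
--                     i += 1
--                 else:
--                     caption = None
--                 # Add table with metadata
--                 tables.append({
--                     'content': "\n".join(current_table),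
--                     'caption': caption,
--                     # 'section': current_metadata.get(1, None),
--                     # 'subsection': current_metadata.get(2, None)
--                     'section': current_metadata.get('level_1'),
--                     'subsection': current_metadata.get('level_2')
--                 })
--                 current_table = []
--
--     # Handle the case where a document ends with a table
--     if in_table:
--         tables.append({
--             'content': "\n".join(current_table),
--             'caption': None,
--             # 'section': current_metadata.get(1, None),
--             # 'subsection': current_metadata.get(2, None)
--             'section': current_metadata.get('level_1'),
--             'subsection': current_metadata.get('level_2')
--         })
--
--     return tables
-- ===== SOURCE B (Python) =====
-- def extract_tables_with_captions(md_content):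
--     lines = md_content.split('\n')
--     n = len(lines)
--     # Pass 1: section/subsection in effect AFTER processing each line's header.
--     # sec[k], sub[k] = the level_1 / level_2 metadata after lines[0..k) have been seen.
--     sec = [None] * (n + 1)
--     sub = [None] * (n + 1)
--     stack = []
--     s1 = s2 = None
--     for i, line in enumerate(lines):
--         st = line.strip()
--         if st.startswith('#'):
--             lvl = st.count('#')
--             stack = stack[:lvl]
--             s1 = s2 = None
--             for l, nm in stack:
--                 if l == 1:
--                     s1 = nm
--                 elif l == 2:
--                     s2 = nm
--             stack.append((lvl, st[lvl:].strip()))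
--         sec[i + 1] = s1
--         sub[i + 1] = s2
--     # Pass 2: collect maximal runs of '|'-containing lines.
--     tables = []
--     i = 0
--     while i < n:
--         if '|' in lines[i]:
--             j = i
--             while j < n and '|' in lines[j]:
--                 j += 1
--             content = "\n".join(lines[i:j])
--             if j < n:
--                 cap_line = lines[j + 1] if j + 1 < n else ""
--                 caption = cap_line.strip() if cap_line and not cap_line.startswith('|') else None
--                 s, ss = sec[j + 1], sub[j + 1]
--             else:
--                 caption = None
--                 s, ss = sec[n], sub[n]
--             tables.append({'content': content, 'caption': caption,
--                            'section': s, 'subsection': ss})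
--             i = j
--         i += 1
--     return tables
-- ===== Notes on version B (the rewrite author's own statement) =====
-- stated objective: alternative
-- what changed: Replaces A's single flag-machine loop (in_table flag, incrementally grown current_table, metadata dict rebuilt per header) by two passes: pass 1 records the section/subsection metadata in effect after each line via an explicit scan of the truncated header stack, pass 2 collects maximal runs of pipe-containing lines by index with an inner run-end scan, slices the content out, and looks the metadata up at the terminator index.
import Mathlib
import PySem

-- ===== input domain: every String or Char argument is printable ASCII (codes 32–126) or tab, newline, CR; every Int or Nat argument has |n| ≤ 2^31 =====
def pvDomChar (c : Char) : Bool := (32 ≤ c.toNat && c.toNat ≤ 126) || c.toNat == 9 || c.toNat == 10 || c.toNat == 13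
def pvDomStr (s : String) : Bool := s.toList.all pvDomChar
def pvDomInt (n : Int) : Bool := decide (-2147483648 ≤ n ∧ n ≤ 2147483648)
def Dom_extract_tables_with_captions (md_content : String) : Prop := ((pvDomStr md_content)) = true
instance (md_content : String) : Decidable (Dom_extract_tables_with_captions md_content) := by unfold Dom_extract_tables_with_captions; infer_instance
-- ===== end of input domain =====

-- B replaces A's single flag-machine loop by two passes (metadata per line, then maximal '|'-runs by index): an alternative decomposition, same O(n) cost.

-- ===== PORT A =====
-- f'level_{level}' with an int level
def pvMetaKey (l : Nat) : String := "level_" ++ PySem.Int.toStr (l : Int)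

-- the header-tracking block of A's loop body: state = (header_stack, current_metadata)
def pvAHeaderStep (st : List (Nat × String) × PySem.Dict String String) (line : String) :
    List (Nat × String) × PySem.Dict String String :=
  let stripped := PySem.Str.strip line
  if PySem.Str.startswith stripped "#" then
    let hl := PySem.Str.count stripped "#"
    let header := PySem.Str.strip (PySem.Str.slice stripped (some (hl : Int)) none)
    let stack' := st.1.take hl
    let metaD := (stack'.foldl (fun d p => d.insert (pvMetaKey p.1) p.2) PySem.Dict.empty).insert
      "current_header" header
    (stack' ++ [(hl, header)], metaD)
  else st

-- the dict literal appended to `tables`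
def pvARow (cur : List String) (cap : Option String) (metaD : PySem.Dict String String) :
    List (String × Option String) :=
  [("content", some (PySem.Str.join "\n" cur)), ("caption", cap),
   ("section", metaD.get? "level_1"), ("subsection", metaD.get? "level_2")]

-- A's `for i, line in enumerate(lines)` loop with its state, plus the trailing-table epilogue
def pvALoop (lines : List String) (rest : List String) (i : Nat)
    (tables : List (List (String × Option String))) (cur : List String) (in_table : Bool)
    (st : List (Nat × String) × PySem.Dict String String) : List (List (String × Option String)) :=
  match rest with
  | [] => if in_table then tables ++ [pvARow cur none st.2] else tables
  | line :: rest' =>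
    let st' := pvAHeaderStep st line
    if PySem.Str.isIn "|" line then
      if in_table then pvALoop lines rest' (i+1) tables (cur ++ [line]) true st'
      else pvALoop lines rest' (i+1) tables [line] true st'
    else
      if in_table then
        let potential := if i + 1 < lines.length then lines.getD (i+1) "" else ""
        let cap := if potential != "" && !PySem.Str.startswith potential "|" then
            some (PySem.Str.strip potential) else none
        pvALoop lines rest' (i+1) (tables ++ [pvARow cur cap st'.2]) [] false st'
      else pvALoop lines rest' (i+1) tables cur false st'

def extract_tables_with_captions (md_content : String) : List (List (String × Option String)) :=
  -- md_content.split('\n'): the separator "\n" is nonempty, so split? is `some`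
  let lines := (PySem.Str.split? md_content "\n").getD []
  pvALoop lines lines 0 [] [] false ([], PySem.Dict.empty)

-- ===== PORT B =====
-- pass-1 header step: state = (stack, s1, s2); s1/s2 recomputed by the explicit for-loop over the truncated stack
def pvBHeadStep (st : List (Nat × String) × Option String × Option String) (line : String) :
    List (Nat × String) × Option String × Option String :=
  let s := PySem.Str.strip line
  if PySem.Str.startswith s "#" then
    let lvl := PySem.Str.count s "#"
    let stack' := st.1.take lvl
    let s12 := stack'.foldl
      (fun (a : Option String × Option String) p =>
        if p.1 == 1 then (some p.2, a.2) else if p.1 == 2 then (a.1, some p.2) else a)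
      (none, none)
    (stack' ++ [(lvl, PySem.Str.strip (PySem.Str.slice s (some (lvl : Int)) none))], s12)
  else st

-- pass 1: the `sec` and `sub` arrays (index k = metadata in effect after lines[0..k))
def pvPass1 (lines : List String) : List (Option String) × List (Option String) :=
  let r := lines.foldl
    (fun (acc : List (Option String) × List (Option String) ×
        (List (Nat × String) × Option String × Option String)) line =>
      let st := pvBHeadStep acc.2.2 line
      (acc.1 ++ [st.2.1], acc.2.1 ++ [st.2.2], st))
    ([none], [none], ([], none, none))
  (r.1, r.2.1)

-- inner while: first index ≥ j whose line has no '|' (or the end)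
def pvRunEnd (lines : List String) (j : Nat) : Nat :=
  if h : j < lines.length then
    if PySem.Str.isIn "|" (lines.getD j "") then pvRunEnd lines (j+1) else j
  else j
termination_by lines.length - j

-- cited by pvScan's termination proof
theorem pvRunEnd_ge (lines : List String) (j : Nat) : j ≤ pvRunEnd lines j := by
  fun_induction pvRunEnd lines j with
  | case1 j h hp ih => omega
  | case2 j h hp => omega
  | case3 j h => omega

-- pass 2: the outer while over indices
def pvScan (lines : List String) (sec sub : List (Option String)) (i : Nat)
    (acc : List (List (String × Option String))) : List (List (String × Option String)) :=
  if hi : i < lines.length then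
    if PySem.Str.isIn "|" (lines.getD i "") then
      let j := pvRunEnd lines i
      let content := PySem.Str.join "\n" (PySem.List.slice lines (some (i : Int)) (some (j : Int)))
      let row :=
        if j < lines.length then
          let capLine := if j + 1 < lines.length then lines.getD (j+1) "" else ""
          let caption := if capLine != "" && !PySem.Str.startswith capLine "|" then
              some (PySem.Str.strip capLine) else none
          [("content", some content), ("caption", caption),
           ("section", sec.getD (j+1) none), ("subsection", sub.getD (j+1) none)]
        else
          [("content", some content), ("caption", (none : Option String)),
           ("section", sec.getD lines.length none), ("subsection", sub.getD lines.length none)]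
      pvScan lines sec sub (j+1) (acc ++ [row])
    else pvScan lines sec sub (i+1) acc
  else acc
termination_by lines.length - i
decreasing_by
  · have := pvRunEnd_ge lines i; omega
  · omega

def extract_tables_with_captions_alt (md_content : String) : List (List (String × Option String)) :=
  -- md_content.split('\n'): the separator "\n" is nonempty, so split? is `some`
  let lines := (PySem.Str.split? md_content "\n").getD []
  let p := pvPass1 lines
  pvScan lines p.1 p.2 0 []

-- ===== PRECONDITION & SPEC =====
def Spec_extract_tables_with_captions (md_content : String) (out : List (List (String × Option String))) : Prop := out = extract_tables_with_captions_alt md_content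
instance (md_content : String) (out : List (List (String × Option String))) : Decidable (Spec_extract_tables_with_captions md_content out) := by unfold Spec_extract_tables_with_captions; infer_instance

-- ===== CLAIM (what is proved, stated in full; the proofs are below) =====
def Claim_equal_extract_tables_with_captions : Prop := ∀ (md_content : String), Dom_extract_tables_with_captions md_content → Spec_extract_tables_with_captions md_content (extract_tables_with_captions md_content)

-- ===== LEMMAS AND PROOFS =====

theorem pvRunEnd_le (lines : List String) (j : Nat) (hj : j ≤ lines.length) :
    pvRunEnd lines j ≤ lines.length := by
  fun_induction pvRunEnd lines j with
  | case1 j h hp ih => exact ih (by omega)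
  | case2 j h hp => omega
  | case3 j h => omega

-- relation between A's (stack, metadata-dict) and B's (stack, s1, s2)
def pvRel (a : List (Nat × String) × PySem.Dict String String)
    (b : List (Nat × String) × Option String × Option String) : Prop :=
  a.1 = b.1 ∧ a.2.get? "level_1" = b.2.1 ∧ a.2.get? "level_2" = b.2.2

theorem pvToDigitsCore_len_pos : ∀ f n, 0 < f → 0 < (Nat.toDigitsCore 10 f n []).length := by
  intro f
  induction f with
  | zero => intro n h; omega
  | succ f ih =>
    intro n _
    rw [Nat.toDigitsCore]
    split
    · simp
    · rw [Nat.toDigitsCore_lens_eq]; omega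

theorem pvToDigits_len_ge_two (m : Nat) (hm : 10 ≤ m) : 2 ≤ (Nat.toDigits 10 m).length := by
  rw [Nat.toDigits, Nat.toDigitsCore]
  split
  · omega
  · rw [Nat.toDigitsCore_lens_eq]
    have := pvToDigitsCore_len_pos m (m/10) (by omega)
    omega

theorem pvMetaKey_eq_one (m : Nat) : pvMetaKey m = "level_1" ↔ m = 1 := by
  unfold pvMetaKey
  constructor
  · intro h
    have h2 : ("level_" ++ PySem.Int.toStr (m : Int)).toList = "level_1".toList := by rw [h]
    rw [String.toList_append, PySem.Int.toList_toStr] at h2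
    have hlev : "level_".toList = ['l','e','v','e','l','_'] := by decide
    have h1 : "level_1".toList = ['l','e','v','e','l','_','1'] := by decide
    rw [hlev, h1] at h2
    have h3 : PySem.Int.toChars (m : Int) = ['1'] := by simpa using h2
    rw [PySem.Int.toChars, if_neg (by omega), Int.toNat_natCast] at h3
    by_cases hm : m < 10
    · interval_cases m <;> (revert h3; decide)
    · have := pvToDigits_len_ge_two m (by omega)
      rw [h3] at this
      simp at this
  · rintro rfl; decide

theorem pvMetaKey_eq_two (m : Nat) : pvMetaKey m = "level_2" ↔ m = 2 := by
  unfold pvMetaKey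
  constructor
  · intro h
    have h2 : ("level_" ++ PySem.Int.toStr (m : Int)).toList = "level_2".toList := by rw [h]
    rw [String.toList_append, PySem.Int.toList_toStr] at h2
    have hlev : "level_".toList = ['l','e','v','e','l','_'] := by decide
    have h1 : "level_2".toList = ['l','e','v','e','l','_','2'] := by decide
    rw [hlev, h1] at h2
    have h3 : PySem.Int.toChars (m : Int) = ['2'] := by simpa using h2
    rw [PySem.Int.toChars, if_neg (by omega), Int.toNat_natCast] at h3
    by_cases hm : m < 10
    · interval_cases m <;> (revert h3; decide)
    · have := pvToDigits_len_ge_two m (by omega)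
      rw [h3] at this
      simp at this
  · rintro rfl; decide

-- the dict comprehension and B's s1/s2 scan agree level-wise
theorem pvKeyfold (l : List (Nat × String)) :
    ∀ (d : PySem.Dict String String) (ab : Option String × Option String),
    d.get? "level_1" = ab.1 → d.get? "level_2" = ab.2 →
    (l.foldl (fun d p => d.insert (pvMetaKey p.1) p.2) d).get? "level_1" =
      (l.foldl (fun (a : Option String × Option String) p =>
        if p.1 == 1 then (some p.2, a.2) else if p.1 == 2 then (a.1, some p.2) else a) ab).1 ∧
    (l.foldl (fun d p => d.insert (pvMetaKey p.1) p.2) d).get? "level_2" =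
      (l.foldl (fun (a : Option String × Option String) p =>
        if p.1 == 1 then (some p.2, a.2) else if p.1 == 2 then (a.1, some p.2) else a) ab).2 := by
  induction l with
  | nil => intro d ab h1 h2; exact ⟨h1, h2⟩
  | cons p l ih =>
    intro d ab h1 h2
    rw [List.foldl_cons, List.foldl_cons]
    by_cases hp1 : p.1 = 1
    · have hk : pvMetaKey p.1 = "level_1" := (pvMetaKey_eq_one p.1).mpr hp1
      refine ih _ _ ?_ ?_
      · rw [hk, PySem.Dict.get?_insert_self, hp1]; simp
      · rw [hk, PySem.Dict.get?_insert_of_ne _ _ (by decide), h2, hp1]; simp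
    · by_cases hp2 : p.1 = 2
      · have hk : pvMetaKey p.1 = "level_2" := (pvMetaKey_eq_two p.1).mpr hp2
        refine ih _ _ ?_ ?_
        · rw [hk, PySem.Dict.get?_insert_of_ne _ _ (by decide), h1, hp2]; simp
        · rw [hk, PySem.Dict.get?_insert_self, hp2]; simp
      · have hk1 : ¬ pvMetaKey p.1 = "level_1" := fun h => hp1 ((pvMetaKey_eq_one p.1).mp h)
        have hk2 : ¬ pvMetaKey p.1 = "level_2" := fun h => hp2 ((pvMetaKey_eq_two p.1).mp h)
        refine ih _ _ ?_ ?_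
        · rw [PySem.Dict.get?_insert_of_ne _ _ (fun h => hk1 h.symm), h1]
          simp [hp1, hp2]
        · rw [PySem.Dict.get?_insert_of_ne _ _ (fun h => hk2 h.symm), h2]
          simp [hp1, hp2]

theorem pvRel_step (a : List (Nat × String) × PySem.Dict String String)
    (b : List (Nat × String) × Option String × Option String) (line : String)
    (h : pvRel a b) : pvRel (pvAHeaderStep a line) (pvBHeadStep b line) := by
  obtain ⟨hs, h1, h2⟩ := h
  unfold pvAHeaderStep pvBHeadStep
  by_cases hh : PySem.Str.startswith (PySem.Str.strip line) "#" = true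
  · simp only [hh, if_true, hs]
    have hkf := pvKeyfold ((b.1.take (PySem.Str.count (PySem.Str.strip line) "#")))
      PySem.Dict.empty (none, none) rfl rfl
    refine ⟨rfl, ?_, ?_⟩
    · rw [PySem.Dict.get?_insert_of_ne _ _ (by decide)]
      exact hkf.1
    · rw [PySem.Dict.get?_insert_of_ne _ _ (by decide)]
      exact hkf.2
  · simp only [hh]
    exact ⟨hs, h1, h2⟩

theorem pvRel_fold (ls : List String)
    (a : List (Nat × String) × PySem.Dict String String)
    (b : List (Nat × String) × Option String × Option String)
    (h : pvRel a b) : pvRel (ls.foldl pvAHeaderStep a) (ls.foldl pvBHeadStep b) := by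
  induction ls generalizing a b with
  | nil => exact h
  | cons x xs ih =>
    rw [List.foldl_cons, List.foldl_cons]
    exact ih (pvAHeaderStep a x) (pvBHeadStep b x) (pvRel_step a b x h)

-- B's state after the first k lines
def pvBSt (lines : List String) (k : Nat) :
    List (Nat × String) × Option String × Option String :=
  (lines.take k).foldl pvBHeadStep ([], none, none)

theorem pvScanl_head {α β : Type} (f : β → α → β) (b : β) (l : List α) :
    List.scanl f b l = b :: (List.scanl f b l).tail := by
  cases l <;> simp

theorem pvPass1_go (ls : List String) :
    ∀ (sec sub : List (Option String)) (st : List (Nat × String) × Option String × Option String),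
    List.foldl
      (fun (acc : List (Option String) × List (Option String) ×
          (List (Nat × String) × Option String × Option String)) line =>
        let st := pvBHeadStep acc.2.2 line
        (acc.1 ++ [st.2.1], acc.2.1 ++ [st.2.2], st)) (sec, sub, st) ls =
      (sec ++ ((List.scanl pvBHeadStep st ls).tail).map (·.2.1),
       sub ++ ((List.scanl pvBHeadStep st ls).tail).map (·.2.2),
       ls.foldl pvBHeadStep st) := by
  induction ls with
  | nil => intro sec sub st; simp
  | cons x xs ih =>
    intro sec sub st
    rw [List.foldl_cons, List.scanl_cons]
    simp only [List.tail_cons]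
    rw [ih, pvScanl_head pvBHeadStep (pvBHeadStep st x) xs]
    simp

-- pass 1 computes the scanl of pvBHeadStep, projected
theorem pvPass1_eq (lines : List String) :
    pvPass1 lines = ((List.scanl pvBHeadStep ([], none, none) lines).map (·.2.1),
                     (List.scanl pvBHeadStep ([], none, none) lines).map (·.2.2)) := by
  unfold pvPass1
  rw [pvPass1_go]
  conv_rhs => rw [pvScanl_head pvBHeadStep ([], none, none) lines]
  simp

theorem pvSec_getD (lines : List String) (k : Nat) (hk : k ≤ lines.length) :
    (pvPass1 lines).1.getD k none = (pvBSt lines k).2.1 ∧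
    (pvPass1 lines).2.getD k none = (pvBSt lines k).2.2 := by
  rw [pvPass1_eq]
  have hlen : k < (List.scanl pvBHeadStep ([], none, none) lines).length := by
    rw [List.length_scanl]; omega
  constructor
  · rw [List.getD_eq_getElem _ _ (by simpa using hlen), List.getElem_map, List.getElem_scanl]
    rfl
  · rw [List.getD_eq_getElem _ _ (by simpa using hlen), List.getElem_map, List.getElem_scanl]
    rfl

-- A's caption computation at a terminator line index e
def pvCap (lines : List String) (e : Nat) : Option String :=
  let potential := if e + 1 < lines.length then lines.getD (e+1) "" else ""
  if potential != "" && !PySem.Str.startswith potential "|" then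
    some (PySem.Str.strip potential) else none

-- A's header state evolved over lines[k:e]
def pvASt2 (lines : List String) (a : List (Nat × String) × PySem.Dict String String)
    (k e : Nat) : List (Nat × String) × PySem.Dict String String :=
  ((lines.take e).drop k).foldl pvAHeaderStep a

-- A consumes a maximal '|'-run: from position k inside a table, up to the run end
theorem pvRunLem (lines : List String) (k : Nat)
    (tables : List (List (String × Option String))) (cur : List String)
    (a : List (Nat × String) × PySem.Dict String String) :
    pvALoop lines (lines.drop k) k tables cur true a =
      if pvRunEnd lines k < lines.length then
        pvALoop lines (lines.drop (pvRunEnd lines k + 1)) (pvRunEnd lines k + 1)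
          (tables ++ [pvARow (cur ++ (lines.take (pvRunEnd lines k)).drop k)
            (pvCap lines (pvRunEnd lines k))
            (pvAHeaderStep (pvASt2 lines a k (pvRunEnd lines k))
              (lines.getD (pvRunEnd lines k) "")).2])
          [] false
          (pvAHeaderStep (pvASt2 lines a k (pvRunEnd lines k)) (lines.getD (pvRunEnd lines k) ""))
      else tables ++ [pvARow (cur ++ (lines.take (pvRunEnd lines k)).drop k) none
            (pvASt2 lines a k (pvRunEnd lines k)).2] := by
  by_cases hk : k < lines.length
  · have hgd : lines.getD k "" = lines[k] := List.getD_eq_getElem _ _ hk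
    by_cases hp : PySem.Str.isIn "|" lines[k] = true
    · -- line k is part of the run
      have he : pvRunEnd lines k = pvRunEnd lines (k+1) := by
        rw [pvRunEnd, dif_pos hk, hgd, if_pos hp]
      have hge : k + 1 ≤ pvRunEnd lines (k+1) := pvRunEnd_ge _ _
      have hseg : (lines.take (pvRunEnd lines k)).drop k =
          lines[k] :: (lines.take (pvRunEnd lines k)).drop (k+1) := by
        have hlt : k < (lines.take (pvRunEnd lines k)).length := by
          simp only [List.length_take]; omega
        rw [List.drop_eq_getElem_cons hlt, List.getElem_take]
      rw [List.drop_eq_getElem_cons hk, pvALoop]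
      simp only [hp, if_true]
      rw [pvRunLem lines (k+1) tables (cur ++ [lines[k]]) (pvAHeaderStep a lines[k])]
      rw [← he]
      have hseg2 : cur ++ (lines.take (pvRunEnd lines k)).drop k =
          (cur ++ [lines[k]]) ++ (lines.take (pvRunEnd lines k)).drop (k+1) := by
        rw [hseg]; simp
      have hst2 : pvASt2 lines (pvAHeaderStep a lines[k]) (k+1) (pvRunEnd lines k) =
          pvASt2 lines a k (pvRunEnd lines k) := by
        unfold pvASt2; rw [hseg, List.foldl_cons]
      rw [hseg2, hst2]
    · -- line k terminates the run
      have he : pvRunEnd lines k = k := by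
        rw [pvRunEnd, dif_pos hk, hgd, if_neg hp]
      have hseg' : (lines.take k).drop k = ([] : List String) := by
        rw [List.drop_take]; simp
      have hst2' : pvASt2 lines a k k = a := by
        unfold pvASt2; rw [hseg']; rfl
      rw [List.drop_eq_getElem_cons hk, pvALoop]
      simp only [hp, Bool.false_eq_true, if_false]
      rw [he, if_pos hk, hseg', hst2', hgd]
      simp [pvCap]
  · have hd : lines.drop k = [] := List.drop_eq_nil_of_le (by omega)
    have he : pvRunEnd lines k = k := by rw [pvRunEnd, dif_neg hk]
    have hseg' : (lines.take k).drop k = ([] : List String) := by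
      rw [List.drop_take]; simp
    have hst2' : pvASt2 lines a k k = a := by
      unfold pvASt2; rw [hseg']; rfl
    rw [hd, pvALoop, he, if_neg hk, hseg', hst2']
    simp
termination_by lines.length - k
decreasing_by omega

-- B's state after a segment extends the state at its start
theorem pvBSt_seg (lines : List String) (i e : Nat) (hie : i ≤ e) :
    pvBSt lines e = ((lines.take e).drop i).foldl pvBHeadStep (pvBSt lines i) := by
  unfold pvBSt
  conv_lhs => rw [show lines.take e = (lines.take e).take i ++ (lines.take e).drop i by
    rw [List.take_append_drop]]
  rw [List.foldl_append, List.take_take, min_eq_left hie]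

set_option maxHeartbeats 1000000 in
theorem pvMainLem (lines : List String) (i : Nat)
    (tables : List (List (String × Option String)))
    (a : List (Nat × String) × PySem.Dict String String)
    (hrel : pvRel a (pvBSt lines i)) :
    pvALoop lines (lines.drop i) i tables [] false a =
      pvScan lines (pvPass1 lines).1 (pvPass1 lines).2 i tables := by
  by_cases hi : i < lines.length
  · have hgd : lines.getD i "" = lines[i] := List.getD_eq_getElem _ _ hi
    by_cases hp : PySem.Str.isIn "|" lines[i] = true
    · -- a run of '|'-lines starts at i
      have he : pvRunEnd lines i = pvRunEnd lines (i+1) := by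
        rw [pvRunEnd, dif_pos hi, hgd, if_pos hp]
      have hge : i + 1 ≤ pvRunEnd lines (i+1) := pvRunEnd_ge _ _
      have hle : pvRunEnd lines i ≤ lines.length := pvRunEnd_le lines i (by omega)
      have hseg : (lines.take (pvRunEnd lines i)).drop i =
          lines[i] :: (lines.take (pvRunEnd lines i)).drop (i+1) := by
        have hlt : i < (lines.take (pvRunEnd lines i)).length := by
          simp only [List.length_take]; omega
        rw [List.drop_eq_getElem_cons hlt, List.getElem_take]
      have hrelE : ∀ m, i ≤ m → pvRel (pvASt2 lines a i m) (pvBSt lines m) := by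
        intro m him
        unfold pvASt2
        rw [pvBSt_seg lines i m him]
        exact pvRel_fold _ _ _ hrel
      have hcont : PySem.Str.join "\n" ((lines.take (pvRunEnd lines i)).drop i) =
          PySem.Str.join "\n" (PySem.List.slice lines (some (i : Int))
            (some ((pvRunEnd lines i) : Int))) := by
        rw [PySem.List.slice_natCast, List.drop_take]
      rw [List.drop_eq_getElem_cons hi, pvALoop]
      simp only [hp, if_true, Bool.false_eq_true, if_false]
      rw [pvRunLem lines (i+1) tables [lines[i]] (pvAHeaderStep a lines[i]), ← he]
      have hst2 : pvASt2 lines (pvAHeaderStep a lines[i]) (i+1) (pvRunEnd lines i) =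
          pvASt2 lines a i (pvRunEnd lines i) := by
        unfold pvASt2; rw [hseg, List.foldl_cons]
      have hsegfull : [lines[i]] ++ (lines.take (pvRunEnd lines i)).drop (i+1) =
          (lines.take (pvRunEnd lines i)).drop i := by rw [hseg]; rfl
      conv_rhs => rw [pvScan]
      rw [dif_pos hi]
      simp only [hgd, hp, if_true]
      by_cases hcase : pvRunEnd lines i < lines.length
      · -- the run has a terminator line
        have hgde : lines.getD (pvRunEnd lines i) "" = lines[pvRunEnd lines i] :=
          List.getD_eq_getElem _ _ hcase
        have haE : pvAHeaderStep (pvASt2 lines a i (pvRunEnd lines i)) lines[pvRunEnd lines i] =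
            pvASt2 lines a i (pvRunEnd lines i + 1) := by
          unfold pvASt2
          rw [List.take_succ_eq_append_getElem hcase,
            List.drop_append_of_le_length (by simp only [List.length_take]; omega),
            List.foldl_append, List.foldl_cons, List.foldl_nil]
        have hrelE1 := hrelE (pvRunEnd lines i + 1) (by omega)
        have hsec := pvSec_getD lines (pvRunEnd lines i + 1) (by omega)
        rw [if_pos hcase, if_pos hcase, hst2, hgde, haE,
          pvMainLem lines (pvRunEnd lines i + 1) _ _ hrelE1]
        congr 2
        simp only [pvARow, pvCap, hsegfull, hcont, hrelE1.2.1, hrelE1.2.2, hsec.1, hsec.2]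
      · have he2 : pvRunEnd lines i = lines.length := by omega
        have hrelp := hrelE (pvRunEnd lines i) (by omega)
        have hsec := pvSec_getD lines (pvRunEnd lines i) hle
        rw [if_neg hcase, if_neg hcase, hst2]
        conv_rhs => rw [pvScan]
        rw [dif_neg (by omega)]
        congr 2
        simp only [pvARow, hsegfull, hcont, hrelp.2.1, hrelp.2.2, ← he2, hsec.1, hsec.2]
    · -- no table at line i
      have hbstep : pvBSt lines (i+1) = pvBHeadStep (pvBSt lines i) lines[i] := by
        unfold pvBSt
        rw [List.take_succ_eq_append_getElem hi, List.foldl_append, List.foldl_cons,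
          List.foldl_nil]
      rw [List.drop_eq_getElem_cons hi, pvALoop]
      simp only [hp, Bool.false_eq_true, if_false]
      rw [pvMainLem lines (i+1) tables (pvAHeaderStep a lines[i])
        (by rw [hbstep]; exact pvRel_step _ _ _ hrel)]
      conv_rhs => rw [pvScan]
      rw [dif_pos hi]
      simp only [hgd, hp, Bool.false_eq_true, if_false]
  · rw [List.drop_eq_nil_of_le (by omega), pvALoop, pvScan, dif_neg hi]
    simp
termination_by lines.length - i
decreasing_by
  · omega
  · omega

-- ===== VERDICT (by name: the statement is the Claim_ definition above) =====
theorem extract_tables_with_captions_spec : Claim_equal_extract_tables_with_captions := by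
  intro md _
  unfold Spec_extract_tables_with_captions extract_tables_with_captions extract_tables_with_captions_alt
  have h := pvMainLem ((PySem.Str.split? md "\n").getD []) 0 [] ([], PySem.Dict.empty)
    (by exact ⟨rfl, rfl, rfl⟩)
  simpa using h
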